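-- pv_equiv track=rewrite | github.com/Aqua7MarcusAurelius/finish-outrich | modules/history/service.py | _compute_flags
-- ===== SOURCE A (Python) =====
-- _AUDIO_TYPES = {"voice", "audio", "video_note"}
--
-- _IMAGE_TYPES = {"photo", "sticker", "gif"}
--
-- _VIDEO_TYPES = {"video", "video_note"}
--
-- def _compute_flags(text: str | None, media: list[dict]) -> dict[str, bool]:
--     types = {m.get("type") for m in media if m.get("type")}
--     return {
--         "has_text": bool(text),
--         "has_audio": bool(types & _AUDIO_TYPES),
--         "has_image": bool(types & _IMAGE_TYPES),
--         "has_video": bool(types & _VIDEO_TYPES),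
--         "has_document": "document" in types,
--     }
-- ===== SOURCE B (Python) =====
-- _AUDIO_TYPES = {"voice", "audio", "video_note"}
--
-- _IMAGE_TYPES = {"photo", "sticker", "gif"}
--
-- _VIDEO_TYPES = {"video", "video_note"}
--
-- def _compute_flags(text, media):
--     has_audio = has_image = has_video = has_document = False
--     for m in media:
--         t = m.get("type")
--         if not t:
--             continue
--         has_audio = has_audio or t in _AUDIO_TYPES
--         has_image = has_image or t in _IMAGE_TYPES
--         has_video = has_video or t in _VIDEO_TYPES
--         has_document = has_document or t == "document"
--     return {
--         "has_text": bool(text),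
--         "has_audio": has_audio,
--         "has_image": has_image,
--         "has_video": has_video,
--         "has_document": has_document,
--     }
-- ===== Notes on version B (the rewrite author's own statement) =====
-- stated objective: simpler
-- what changed: Drops the intermediate set and the three set-intersection tests: a single pass over media ORs category-membership of each type directly into five booleans.
import Mathlib
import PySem

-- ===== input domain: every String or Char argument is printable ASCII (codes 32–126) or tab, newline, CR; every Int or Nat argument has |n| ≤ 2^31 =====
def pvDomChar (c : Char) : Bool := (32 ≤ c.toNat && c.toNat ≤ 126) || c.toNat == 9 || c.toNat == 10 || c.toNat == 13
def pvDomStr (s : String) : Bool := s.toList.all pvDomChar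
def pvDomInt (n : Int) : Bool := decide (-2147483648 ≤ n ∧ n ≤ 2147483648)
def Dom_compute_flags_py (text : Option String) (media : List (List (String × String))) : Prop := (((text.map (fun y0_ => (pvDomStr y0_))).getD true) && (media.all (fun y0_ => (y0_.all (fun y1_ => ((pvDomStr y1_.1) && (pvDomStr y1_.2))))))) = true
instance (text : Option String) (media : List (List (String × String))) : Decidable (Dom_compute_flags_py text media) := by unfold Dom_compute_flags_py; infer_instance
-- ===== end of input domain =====

-- B replaces A's intermediate set and set-intersections by a single pass ORing five booleans (objective: simpler).

-- ===== PORT A =====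
-- bool(text) for text : Option String (None or string; truthy = non-empty string)
def pvTextTruthy (text : Option String) : Bool :=
  match text with
  | none => false
  | some s => !(s == "")

def pvAudioTypes : PySem.Set String := PySem.Set.ofList ["voice", "audio", "video_note"]
def pvImageTypes : PySem.Set String := PySem.Set.ofList ["photo", "sticker", "gif"]
def pvVideoTypes : PySem.Set String := PySem.Set.ofList ["video", "video_note"]

-- the set comprehension {m.get("type") for m in media if m.get("type")} as a fold over media
def pvTypesStep (s : PySem.Set String) (m : List (String × String)) : PySem.Set String :=
  match (PySem.Dict.mk m).get? "type" with
  | none => s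
  | some t => if t == "" then s else PySem.Set.add s t

def compute_flags_py (text : Option String) (media : List (List (String × String))) : List (String × Bool) :=
  let types : PySem.Set String := media.foldl pvTypesStep PySem.Set.empty
  [("has_text", pvTextTruthy text),
   ("has_audio", !(PySem.Set.inter types pvAudioTypes).isEmpty),
   ("has_image", !(PySem.Set.inter types pvImageTypes).isEmpty),
   ("has_video", !(PySem.Set.inter types pvVideoTypes).isEmpty),
   ("has_document", types.contains "document")]

-- ===== PORT B =====
-- one pass, ORing category membership into four booleans
def pvFlagsStep (fl : Bool × Bool × Bool × Bool) (m : List (String × String)) :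
    Bool × Bool × Bool × Bool :=
  match (PySem.Dict.mk m).get? "type" with
  | none => fl
  | some t =>
      if t == "" then fl
      else (fl.1 || (["voice", "audio", "video_note"] : List String).contains t,
            fl.2.1 || (["photo", "sticker", "gif"] : List String).contains t,
            fl.2.2.1 || (["video", "video_note"] : List String).contains t,
            fl.2.2.2 || (t == "document"))

def compute_flags_py_alt (text : Option String) (media : List (List (String × String))) : List (String × Bool) :=
  let fl := media.foldl pvFlagsStep (false, false, false, false)
  [("has_text", pvTextTruthy text),
   ("has_audio", fl.1),
   ("has_image", fl.2.1),
   ("has_video", fl.2.2.1),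
   ("has_document", fl.2.2.2)]

-- ===== PRECONDITION & SPEC =====
def Spec_compute_flags_py (text : Option String) (media : List (List (String × String))) (out : List (String × Bool)) : Prop := out = compute_flags_py_alt text media
instance (text : Option String) (media : List (List (String × String))) (out : List (String × Bool)) : Decidable (Spec_compute_flags_py text media out) := by unfold Spec_compute_flags_py; infer_instance

-- ===== CLAIM (what is proved, stated in full; the proofs are below) =====
def Claim_equal_compute_flags_py : Prop := ∀ (text : Option String) (media : List (List (String × String))), Dom_compute_flags_py text media → Spec_compute_flags_py text media (compute_flags_py text media)

-- ===== LEMMAS AND PROOFS =====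

-- the scalar loop B runs for one category, predicate p
def pvScalarStep (p : String → Bool) (b : Bool) (m : List (String × String)) : Bool :=
  match (PySem.Dict.mk m).get? "type" with
  | none => b
  | some t => if t == "" then b else b || p t

lemma any_add (s : PySem.Set String) (t : String) (p : String → Bool) :
    (PySem.Set.add s t).any p = (s.any p || p t) := by
  rw [PySem.Set.add_eq_ite]
  by_cases h : t ∈ s
  · rw [if_pos h]
    cases hp : p t
    · simp
    · have hs : s.any p = true := List.any_eq_true.2 ⟨t, h, hp⟩
      simp [hs]
  · rw [if_neg h]
    simp

lemma foldA_any (p : String → Bool) (media : List (List (String × String))) :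
    ∀ s : PySem.Set String,
      (media.foldl pvTypesStep s).any p = media.foldl (pvScalarStep p) (s.any p) := by
  induction media with
  | nil => intro s; rfl
  | cons m rest ih =>
      intro s
      simp only [List.foldl_cons]
      rw [ih]
      congr 1
      unfold pvTypesStep pvScalarStep
      cases (PySem.Dict.mk m).get? "type" with
      | none => rfl
      | some t =>
          by_cases ht : t == ""
          · simp [ht]
          · simp only [ht, if_false, Bool.false_eq_true]
            exact any_add s t p

lemma inter_nonempty_any (s t : List String) :
    (!(PySem.Set.inter s t).isEmpty) = s.any (fun x => t.contains x) := by
  simp only [PySem.Set.inter, PySem.Set.contains, List.contains_eq_mem]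
  induction s with
  | nil => rfl
  | cons a s ih =>
      rw [List.filter_cons]
      by_cases h : a ∈ t
      · simp [h]
      · rw [if_neg (by simpa using h)]
        simp only [List.any_cons, ih]
        simp [h]

lemma contains_eq_any (s : PySem.Set String) :
    s.contains "document" = s.any (fun t => t == "document") := by
  simp only [PySem.Set.contains]
  induction s with
  | nil => rfl
  | cons a s ih =>
      simp only [List.contains_cons, List.any_cons, ← ih]
      congr 1
      simp [eq_comm]

lemma flags_fold_proj (media : List (List (String × String))) :
    ∀ fl : Bool × Bool × Bool × Bool,
      media.foldl pvFlagsStep fl =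
        (media.foldl (pvScalarStep fun t => (["voice", "audio", "video_note"] : List String).contains t) fl.1,
         media.foldl (pvScalarStep fun t => (["photo", "sticker", "gif"] : List String).contains t) fl.2.1,
         media.foldl (pvScalarStep fun t => (["video", "video_note"] : List String).contains t) fl.2.2.1,
         media.foldl (pvScalarStep fun t => (t == "document")) fl.2.2.2) := by
  induction media with
  | nil => intro fl; rfl
  | cons m rest ih =>
      intro fl
      simp only [List.foldl_cons]
      rw [ih]
      cases hg : (PySem.Dict.mk m).get? "type" with
      | none => simp [pvFlagsStep, pvScalarStep, hg]
      | some t =>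
          by_cases ht : t == ""
          · simp [pvFlagsStep, pvScalarStep, hg, ht]
          · simp [pvFlagsStep, pvScalarStep, hg, ht]

-- ===== VERDICT (by name: the statement is the Claim_ definition above) =====
theorem compute_flags_py_spec : Claim_equal_compute_flags_py := by
  intro text media _
  unfold Spec_compute_flags_py compute_flags_py compute_flags_py_alt
  simp only
  rw [flags_fold_proj]
  simp only [inter_nonempty_any]
  rw [foldA_any, foldA_any, foldA_any]
  rw [contains_eq_any, foldA_any]
  rfl
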